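-- pv_equiv track=rewrite | github.com/huongntt309/TNMT_NLP_API_service | sp_func.py | divideText
-- ===== SOURCE A (Python) =====
-- def divideText(title_len, prediction, sents, lim=850):
--     sentlen = [len(s.split(' ')) for s in sents]
--     sentid = 0
--     curlen, curtext = title_len + len(prediction.split(' ')), ''
--
--     while sentid < len(sents) and curlen + sentlen[sentid] <= lim:
--         curtext += sents[sentid] + ' '
--         curlen += sentlen[sentid]
--         sentid += 1
--
--     if sentid < len(sents) and curtext == '':
--         curtext += sents[sentid] + ' '
--         curlen += sentlen[sentid]
--         sentid += 1
--     return curtext, sents[sentid:]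
-- ===== SOURCE B (Python) =====
-- def divideText(title_len, prediction, sents, lim=850):
--     # recursive decomposition: thread a shrinking word budget down,
--     # build the packed text on the way back out of the recursion
--     def pack(budget, ss):
--         if not ss:
--             return '', []
--         w = len(ss[0].split(' '))
--         if w > budget:
--             return '', ss
--         text, rest = pack(budget - w, ss[1:])
--         return ss[0] + ' ' + text, rest
--
--     text, rest = pack(lim - title_len - len(prediction.split(' ')), sents)
--     if text == '' and sents:
--         return sents[0] + ' ', sents[1:]
--     return text, rest
-- ===== Notes on version B (the rewrite author's own statement) =====
-- stated objective: alternative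
-- what changed: Replaces A's iterative loop with mutable running total/text/index by a recursive helper that threads a shrinking word budget downward and assembles the packed text right-to-left while unwinding, with the force-include decided once at the top level from the empty result.
import Mathlib
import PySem

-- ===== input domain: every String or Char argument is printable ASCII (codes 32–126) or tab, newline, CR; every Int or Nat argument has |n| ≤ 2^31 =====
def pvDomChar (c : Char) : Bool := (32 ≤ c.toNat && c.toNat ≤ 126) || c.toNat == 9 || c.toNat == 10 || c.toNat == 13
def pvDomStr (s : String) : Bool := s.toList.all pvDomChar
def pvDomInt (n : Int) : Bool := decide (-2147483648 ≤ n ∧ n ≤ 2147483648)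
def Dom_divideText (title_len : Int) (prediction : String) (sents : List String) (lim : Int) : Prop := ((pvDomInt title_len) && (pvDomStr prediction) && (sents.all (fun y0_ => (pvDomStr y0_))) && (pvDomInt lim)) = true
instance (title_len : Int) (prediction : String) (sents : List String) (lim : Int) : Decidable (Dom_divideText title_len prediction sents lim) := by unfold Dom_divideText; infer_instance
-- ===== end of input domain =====

-- B replaces A's iterative while-loop with mutable running total/text/index by a
-- recursive helper threading a shrinking word budget, building the text while
-- unwinding; force-include decided once at the top (objective: alternative).

-- word count of a sentence: len(s.split(' '))
def pvWc (s : String) : Int := (((PySem.Str.split? s " ").getD []).length : Int)  -- sep " " ≠ "", so split? is always some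

-- ===== PORT A =====
-- the while loop: walks sents together with the precomputed sentlen list
def divideWhile : List String → List Int → Int → String → Int → String × List String
  | [], _, _, curtext, _ => (curtext, [])
  | s :: rest, l :: ls, curlen, curtext, lim =>
      if curlen + l ≤ lim then divideWhile rest ls (curlen + l) (curtext ++ s ++ " ") lim
      else (curtext, s :: rest)
  | s :: rest, [], _, curtext, _ => (curtext, s :: rest)  -- unreachable: sentlen has one entry per sentence

def divideText (title_len : Int) (prediction : String) (sents : List String) (lim : Int) : String × List String :=
  let sentlen := sents.map pvWc
  match divideWhile sents sentlen (title_len + pvWc prediction) "" lim with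
  | (curtext, []) => (curtext, [])
  | (curtext, s :: rest) =>
      if curtext = "" then (curtext ++ s ++ " ", rest) else (curtext, s :: rest)

-- ===== PORT B =====
-- pack(budget, ss): recursion threading the remaining word budget; the packed
-- text is assembled right-to-left as the recursion unwinds
def packB : Int → List String → String × List String
  | _, [] => ("", [])
  | budget, s :: rest =>
      if pvWc s > budget then ("", s :: rest)
      else
        let p := packB (budget - pvWc s) rest
        (s ++ " " ++ p.1, p.2)

def divideText_alt (title_len : Int) (prediction : String) (sents : List String) (lim : Int) : String × List String :=
  let p := packB (lim - title_len - pvWc prediction) sents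
  match sents with
  | [] => (p.1, p.2)
  | s :: r => if p.1 = "" then (s ++ " ", r) else (p.1, p.2)

-- ===== PRECONDITION & SPEC =====
def Spec_divideText (title_len : Int) (prediction : String) (sents : List String) (lim : Int) (out : String × List String) : Prop := out = divideText_alt title_len prediction sents lim
instance (title_len : Int) (prediction : String) (sents : List String) (lim : Int) (out : String × List String) : Decidable (Spec_divideText title_len prediction sents lim out) := by unfold Spec_divideText; infer_instance

-- ===== CLAIM =====
def Claim_equal_divideText : Prop := ∀ (title_len : Int) (prediction : String) (sents : List String) (lim : Int), Dom_divideText title_len prediction sents lim → Spec_divideText title_len prediction sents lim (divideText title_len prediction sents lim)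

-- ===== LEMMAS AND PROOFS =====

-- the while loop equals "prepend curtext to what the budget recursion packs"
theorem divideWhile_eq (rest : List String) (curlen : Int) (curtext : String) (lim : Int) :
    divideWhile rest (rest.map pvWc) curlen curtext lim =
      (curtext ++ (packB (lim - curlen) rest).1, (packB (lim - curlen) rest).2) := by
  induction rest generalizing curlen curtext with
  | nil => simp [divideWhile, packB]
  | cons s r ih =>
      by_cases h : curlen + pvWc s ≤ lim
      · have h' : ¬ pvWc s > lim - curlen := by omega
        have e : lim - curlen - pvWc s = lim - (curlen + pvWc s) := by ring
        simp only [List.map_cons, divideWhile, if_pos h, ih, packB, if_neg h', e,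
          String.append_assoc]
      · have h' : pvWc s > lim - curlen := by omega
        simp [divideWhile, h, packB, h']

-- ===== VERDICT =====
theorem divideText_spec : Claim_equal_divideText := by
  intro title_len prediction sents lim _
  unfold Spec_divideText
  have base : lim - (title_len + pvWc prediction) = lim - title_len - pvWc prediction := by ring
  simp only [divideText, divideText_alt, divideWhile_eq, base, String.empty_append]
  cases sents with
  | nil => simp [packB]
  | cons s r =>
      by_cases h : pvWc s > lim - title_len - pvWc prediction
      · simp [packB, h]
      · simp only [packB, if_neg h]
        cases hd : (packB (lim - title_len - pvWc prediction - pvWc s) r).2 with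
        | nil => simp
        | cons t ts => simp
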